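-- pv_equiv track=rewrite | github.com/IonSon121977/Portfolio-Manager | scripts/shared.py | _grade_action
-- ===== SOURCE A (Python) =====
-- def _grade_action(tg: str) -> str:
--     """Map a grade string to up/down/reit."""
--     tl = (tg or "").lower()
--     if any(w in tl for w in ["buy", "outperform", "overweight", "strong buy",
--                                "accumulate", "add", "positive"]):
--         return "up"
--     if any(w in tl for w in ["sell", "underperform", "underweight", "strong sell",
--                                "reduce", "negative"]):
--         return "down"
--     return "reit"
-- ===== SOURCE B (Python) =====
-- _UP = ("buy", "outperform", "overweight", "strong buy",
--        "accumulate", "add", "positive")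
-- _DOWN = ("sell", "underperform", "underweight", "strong sell",
--          "reduce", "negative")
--
-- def _grade_action(tg: str) -> str:
--     """Map a grade string to up/down/reit."""
--     tl = (tg or "").lower()
--     up = down = False
--     for i in range(len(tl)):
--         suf = tl[i:]
--         up = up or any(suf.startswith(w) for w in _UP)
--         down = down or any(suf.startswith(w) for w in _DOWN)
--     return "up" if up else "down" if down else "reit"
-- ===== Notes on version B (the rewrite author's own statement) =====
-- stated objective: alternative
-- what changed: Instead of two any()-branches of per-keyword substring membership tests, B makes a single left-to-right sweep over the positions of the lowered string, testing each suffix with startswith against the keyword sets and accumulating up/down flags, then maps the flags to the label; it trades speed for a uniform one-pass scan.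
import Mathlib
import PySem

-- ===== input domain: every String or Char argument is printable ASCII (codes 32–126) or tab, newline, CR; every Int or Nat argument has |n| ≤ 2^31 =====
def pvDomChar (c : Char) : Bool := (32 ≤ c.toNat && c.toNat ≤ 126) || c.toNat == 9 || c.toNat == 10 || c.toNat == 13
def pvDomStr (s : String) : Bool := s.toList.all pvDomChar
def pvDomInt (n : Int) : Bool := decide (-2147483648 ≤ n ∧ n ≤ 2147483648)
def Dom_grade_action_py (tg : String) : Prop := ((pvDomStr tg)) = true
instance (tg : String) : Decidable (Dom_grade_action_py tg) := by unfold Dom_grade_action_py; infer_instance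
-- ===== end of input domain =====

-- B replaces A's per-keyword substring tests by one left-to-right sweep over the suffixes
-- of the lowered string, accumulating up/down flags via startswith (alternative; same cost).

-- ===== PORT A =====
def grade_action_py (tg : String) : String :=
  -- tl = (tg or "").lower()
  let tl := PySem.Str.lower (if tg == "" then "" else tg)
  if ["buy", "outperform", "overweight", "strong buy",
      "accumulate", "add", "positive"].any (fun w => PySem.Str.isIn w tl) then "up"
  else if ["sell", "underperform", "underweight", "strong sell",
           "reduce", "negative"].any (fun w => PySem.Str.isIn w tl) then "down"
  else "reit"

-- ===== PORT B =====
def upWords : List String :=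
  ["buy", "outperform", "overweight", "strong buy", "accumulate", "add", "positive"]
def downWords : List String :=
  ["sell", "underperform", "underweight", "strong sell", "reduce", "negative"]

-- the `for i in range(len(tl))` loop of Source B: recursion over the suffixes, carrying the flags
def gradeScan : List Char → Bool → Bool → Bool × Bool
  | [], up, down => (up, down)
  | c :: rest, up, down =>
    gradeScan rest
      (up || upWords.any (fun w => PySem.Chars.startswith (c :: rest) w.toList))
      (down || downWords.any (fun w => PySem.Chars.startswith (c :: rest) w.toList))

def grade_action_py_alt (tg : String) : String :=
  let tl := PySem.Str.lower (if tg == "" then "" else tg)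
  let fl := gradeScan tl.toList false false
  if fl.1 then "up" else if fl.2 then "down" else "reit"

-- ===== PRECONDITION & SPEC =====
def Spec_grade_action_py (tg : String) (out : String) : Prop := out = grade_action_py_alt tg
instance (tg : String) (out : String) : Decidable (Spec_grade_action_py tg out) := by unfold Spec_grade_action_py; infer_instance

-- ===== CLAIM =====
def Claim_equal_grade_action_py : Prop := ∀ (tg : String), Dom_grade_action_py tg → Spec_grade_action_py tg (grade_action_py tg)

-- ===== LEMMAS AND PROOFS =====
-- the flag accumulated for one word list, without the carried state
def suffHit (ws : List String) : List Char → Bool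
  | [] => false
  | c :: rest => ws.any (fun w => PySem.Chars.startswith (c :: rest) w.toList) || suffHit ws rest

theorem gradeScan_eq (s : List Char) : ∀ up down,
    gradeScan s up down = (up || suffHit upWords s, down || suffHit downWords s) := by
  induction s with
  | nil => intro up down; simp [gradeScan, suffHit]
  | cons c rest ih =>
    intro up down
    simp [gradeScan, suffHit, ih, Bool.or_assoc]

theorem suffHit_iff (ws : List String) (s : List Char) :
    suffHit ws s = true ↔ ∃ w ∈ ws, ∃ j, j < s.length ∧ w.toList <+: s.drop j := by
  induction s with
  | nil => simp [suffHit]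
  | cons c rest ih =>
    simp only [suffHit, Bool.or_eq_true, List.any_eq_true, ih]
    constructor
    · rintro (⟨w, hw, hsw⟩ | ⟨w, hw, j, hj, hpre⟩)
      · exact ⟨w, hw, 0, by simp, by simpa [PySem.Chars.startswith_iff] using hsw⟩
      · exact ⟨w, hw, j + 1, by simpa using hj, by simpa using hpre⟩
    · rintro ⟨w, hw, j, hj, hpre⟩
      cases j with
      | zero => exact Or.inl ⟨w, hw, by simpa [PySem.Chars.startswith_iff] using hpre⟩
      | succ j => exact Or.inr ⟨w, hw, j, by simpa using hj, by simpa using hpre⟩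

theorem suffHit_eq_any_isIn (ws : List String) (h : ∀ w ∈ ws, w.toList ≠ []) (s : List Char) :
    suffHit ws s = ws.any (fun w => PySem.Chars.isIn w.toList s) := by
  rw [Bool.eq_iff_iff, suffHit_iff, List.any_eq_true]
  constructor
  · rintro ⟨w, hw, j, _, hpre⟩
    exact ⟨w, hw, (PySem.Chars.exists_prefix_drop_iff_isIn _ _).mp ⟨j, hpre⟩⟩
  · rintro ⟨w, hw, hin⟩
    obtain ⟨j, hpre⟩ := (PySem.Chars.exists_prefix_drop_iff_isIn _ _).mpr hin
    refine ⟨w, hw, j, ?_, hpre⟩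
    by_contra hj
    have : s.drop j = [] := List.drop_eq_nil_of_le (by omega)
    rw [this, List.prefix_nil] at hpre
    exact h w hw hpre

-- ===== VERDICT =====
theorem grade_action_py_spec : Claim_equal_grade_action_py := by
  intro tg _
  unfold Spec_grade_action_py grade_action_py grade_action_py_alt
  simp only [gradeScan_eq, Bool.false_or]
  rw [suffHit_eq_any_isIn upWords (by decide), suffHit_eq_any_isIn downWords (by decide)]
  simp only [upWords, downWords, PySem.Str.isIn_eq]
  rfl
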